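-- pv_equiv track=rewrite | github.com/devonjones/StatblockExtractor | statblock/filters.py | pageend_filter
-- ===== SOURCE A (Python) =====
-- def pageend_filter(lines):
-- 	retlines = []
-- 	while len(lines) > 0:
-- 		line = lines.pop(0)
-- 		if line.strip() == "|PAGEEND|":
-- 			for i in range(len(lines)):
-- 				line = lines[i].strip()
-- 				if line == "":
-- 					continue
-- 				if not line.isupper():
-- 					break
-- 				if line == "|PAGEEND|":
-- 					lines = lines[i:]
-- 					break
-- 		else:
-- 			retlines.append(line)
-- 	return retlines
-- ===== SOURCE B (Python) =====
-- def pageend_filter(lines):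
--     # Single forward pass with a skipping flag and pending buffer (no mutation of
--     # the caller's list, unlike A which pops it empty; equivalence is on the return value).
--     out = []
--     skipping = False
--     buf = []
--     for line in lines:
--         s = line.strip()
--         if not skipping:
--             if s == "|PAGEEND|":
--                 skipping = True
--                 buf = []
--             else:
--                 out.append(line)
--         else:
--             if s == "":
--                 buf.append(line)
--             elif s == "|PAGEEND|":
--                 buf = []
--             elif s.isupper():
--                 buf.append(line)
--             else:
--                 out.extend(buf)
--                 out.append(line)
--                 skipping = False
--                 buf = []
--     if skipping:
--         out.extend(buf)
--     return out
-- ===== Notes on version B (the rewrite author's own statement) =====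
-- stated objective: faster
-- what changed: Replaced the destructive while-pop(0) loop with nested index lookahead and list re-slicing by a single read-only forward pass keeping a skipping flag and a pending buffer of blank/uppercase lines that is flushed or discarded.
import Mathlib
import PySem

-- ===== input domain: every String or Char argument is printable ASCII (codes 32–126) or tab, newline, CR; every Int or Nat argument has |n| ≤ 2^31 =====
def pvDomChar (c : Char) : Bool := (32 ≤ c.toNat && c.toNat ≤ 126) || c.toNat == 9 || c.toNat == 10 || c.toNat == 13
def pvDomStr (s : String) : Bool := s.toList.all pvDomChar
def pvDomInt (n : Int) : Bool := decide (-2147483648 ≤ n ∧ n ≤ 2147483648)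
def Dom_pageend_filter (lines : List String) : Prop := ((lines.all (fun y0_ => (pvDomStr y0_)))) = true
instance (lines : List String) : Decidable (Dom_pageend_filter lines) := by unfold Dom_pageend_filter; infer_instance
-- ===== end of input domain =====

-- B replaces A's destructive pop/lookahead/re-slice loop by one read-only forward pass with a
-- skipping flag and a pending buffer (A mutates `lines` via pop(0)/slicing; equivalence is on the
-- return value only).


-- Python str.isupper(), exact on ASCII: at least one cased (= alphabetic) character and no lowercase one.
def pyIsupper (s : String) : Bool :=
  s.toList.any PySem.Chars.isalpha && s.toList.all (fun c => !PySem.Chars.islower c)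

-- ===== PORT A =====
-- A's inner `for i in range(len(lines))` lookahead, transcribed as recursion over the suffix
-- starting at index i: returns `some (lines[i:])` when it finds a second "|PAGEEND|",
-- `none` when it breaks on a non-upper line or falls off the end (then `lines` is unchanged).
def scanA : List String → Option (List String)
  | [] => none
  | l :: rest =>
    if PySem.Str.strip l = "" then scanA rest
    else if ¬ (pyIsupper (PySem.Str.strip l) = true) then none
    else if PySem.Str.strip l = "|PAGEEND|" then some (l :: rest)
    else scanA rest

theorem scanA_length_le : ∀ (lines nl : List String), scanA lines = some nl → nl.length ≤ lines.length := by
  intro lines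
  induction lines with
  | nil => intro nl h; simp [scanA] at h
  | cons l rest ih =>
    intro nl h
    rw [scanA] at h
    by_cases h1 : PySem.Str.strip l = ""
    · rw [if_pos h1] at h; have := ih nl h; simp; omega
    · rw [if_neg h1] at h
      by_cases h2 : pyIsupper (PySem.Str.strip l) = true
      · rw [if_neg (by simp [h2])] at h
        by_cases h3 : PySem.Str.strip l = "|PAGEEND|"
        · rw [if_pos h3] at h; cases h; simp
        · rw [if_neg h3] at h; have := ih nl h; simp; omega
      · rw [if_pos (by simp [h2])] at h; cases h

-- A's outer while loop: pop the head; on "|PAGEEND|" run the lookahead and continue on the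
-- (possibly re-sliced) remainder; otherwise append the line.
def pageend_filter (lines : List String) : List String :=
  match lines with
  | [] => []
  | l :: rest =>
    if PySem.Str.strip l = "|PAGEEND|" then
      match h : scanA rest with
      | some nl => pageend_filter nl
      | none => pageend_filter rest
    else l :: pageend_filter rest
termination_by lines.length
decreasing_by
  · have := scanA_length_le rest nl h; simp; omega
  · simp
  · simp

-- ===== PORT B =====
-- B's single pass: `skipping` flag and pending buffer `buf`; flushed on a normal line or at the end.
def goB : List String → Bool → List String → List String
  | [], true, buf => buf
  | [], false, _ => []
  | l :: rest, false, buf =>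
    if PySem.Str.strip l = "|PAGEEND|" then goB rest true []
    else l :: goB rest false buf
  | l :: rest, true, buf =>
    if PySem.Str.strip l = "" then goB rest true (buf ++ [l])
    else if PySem.Str.strip l = "|PAGEEND|" then goB rest true []
    else if pyIsupper (PySem.Str.strip l) then goB rest true (buf ++ [l])
    else buf ++ l :: goB rest false []

def pageend_filter_alt (lines : List String) : List String := goB lines false []

-- ===== PRECONDITION & SPEC =====
def Spec_pageend_filter (lines : List String) (out : List String) : Prop := out = pageend_filter_alt lines
instance (lines : List String) (out : List String) : Decidable (Spec_pageend_filter lines out) := by unfold Spec_pageend_filter; infer_instance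

-- ===== CLAIM (what is proved, stated in full; the proofs are below) =====
def Claim_equal_pageend_filter : Prop := ∀ (lines : List String), Dom_pageend_filter lines → Spec_pageend_filter lines (pageend_filter lines)

-- ===== LEMMAS AND PROOFS =====

theorem pageend_pyIsupper : pyIsupper "|PAGEEND|" = true := by decide

-- Unfolding equations for A's outer loop (the dependent match on `scanA` needs `split`).
theorem pA_pe_some {l : String} {rest nl : List String} (hp : PySem.Str.strip l = "|PAGEEND|")
    (h : scanA rest = some nl) : pageend_filter (l :: rest) = pageend_filter nl := by
  rw [pageend_filter, if_pos hp]
  split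
  · next nl' h' => rw [h] at h'; cases h'; rfl
  · next h' => rw [h] at h'; cases h'

theorem pA_pe_none {l : String} {rest : List String} (hp : PySem.Str.strip l = "|PAGEEND|")
    (h : scanA rest = none) : pageend_filter (l :: rest) = pageend_filter rest := by
  rw [pageend_filter, if_pos hp]
  split
  · next nl' h' => rw [h] at h'; cases h'
  · next => rfl

theorem pA_cons {l : String} {rest : List String} (hp : ¬ PySem.Str.strip l = "|PAGEEND|") :
    pageend_filter (l :: rest) = l :: pageend_filter rest := by
  rw [pageend_filter, if_neg hp]

-- Joint invariant: in normal mode A's remaining run equals B's; in skipping mode B's run with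
-- pending buffer `buf` equals A's lookahead outcome (discard on a found marker, flush otherwise).
theorem main_inv : ∀ (n : ℕ) (lines : List String), lines.length ≤ n →
    (pageend_filter lines = goB lines false [] ∧
     ∀ buf, goB lines true buf =
       (match scanA lines with
        | some nl => pageend_filter nl
        | none => buf ++ pageend_filter lines)) := by
  intro n
  induction n with
  | zero =>
    intro lines hl
    have : lines = [] := List.length_eq_zero_iff.mp (Nat.le_zero.mp hl)
    subst this
    exact ⟨by rw [pageend_filter, goB], fun buf => by rw [goB, scanA, pageend_filter]; simp⟩
  | succ n ih =>
    intro lines hl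
    match lines with
    | [] =>
      exact ⟨by rw [pageend_filter, goB], fun buf => by rw [goB, scanA, pageend_filter]; simp⟩
    | l :: rest =>
      have hr : rest.length ≤ n := by simp at hl; omega
      have IH := ih rest hr
      constructor
      · -- normal mode
        rw [goB]
        by_cases hp : PySem.Str.strip l = "|PAGEEND|"
        · rw [if_pos hp, IH.2 []]
          cases h : scanA rest with
          | some nl => simp only [pA_pe_some hp h]
          | none => simp only [pA_pe_none hp h, IH.1, List.nil_append]
        · rw [if_neg hp, pA_cons hp, IH.1]
      · -- skipping mode
        intro buf
        rw [goB]
        by_cases h0 : PySem.Str.strip l = ""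
        · -- blank line: buffered, and scanA continues past it
          have hscan : scanA (l :: rest) = scanA rest := by rw [scanA, if_pos h0]
          rw [if_pos h0, IH.2 (buf ++ [l]), hscan]
          cases h : scanA rest with
          | some nl => simp only
          | none =>
            have hne : ¬ PySem.Str.strip l = "|PAGEEND|" := by rw [h0]; decide
            simp only [pA_cons hne, List.append_assoc, List.cons_append, List.nil_append]
        · by_cases hp : PySem.Str.strip l = "|PAGEEND|"
          · -- second marker: buffer discarded, A re-slices to here and pops it again
            have hu := hp ▸ pageend_pyIsupper
            have hscan : scanA (l :: rest) = some (l :: rest) := by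
              rw [scanA, if_neg h0, if_neg (by simp [hu]), if_pos hp]
            rw [if_neg h0, if_pos hp, hscan]
            simp only
            rw [IH.2 []]
            cases h : scanA rest with
            | some nl => simp only [pA_pe_some hp h]
            | none => simp only [pA_pe_none hp h, IH.1, List.nil_append]
          · by_cases hu : pyIsupper (PySem.Str.strip l) = true
            · -- uppercase non-marker: buffered, scanA continues
              have hscan : scanA (l :: rest) = scanA rest := by
                rw [scanA, if_neg h0, if_neg (by simp [hu]), if_neg hp]
              rw [if_neg h0, if_neg hp, if_pos hu, IH.2 (buf ++ [l]), hscan]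
              cases h : scanA rest with
              | some nl => simp only
              | none =>
                simp only [pA_cons hp, List.append_assoc, List.cons_append, List.nil_append]
            · -- non-upper line: flush the buffer, back to normal mode
              have hscan : scanA (l :: rest) = none := by
                rw [scanA, if_neg h0, if_pos (by simp [hu])]
              rw [if_neg h0, if_neg hp, if_neg hu, hscan]
              simp only [pA_cons hp, IH.1]

-- ===== VERDICT (by name: the statement is the Claim_ definition above) =====
theorem pageend_filter_spec : Claim_equal_pageend_filter := by
  intro lines _
  unfold Spec_pageend_filter pageend_filter_alt
  exact (main_inv lines.length lines le_rfl).1
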